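-- pv_equiv track=rewrite | github.com/vsdsantos/nastran-aeroelasticity | src/nastran/post/f06.py | _group_lines_by_page
-- ===== SOURCE A (Python) =====
-- def _group_lines_by_page(lines):
--     groups = []
--     group = []
--     for i, line in enumerate(lines):
--         if line[0] == '1' and len(group) > 0:
--             groups.append(group)
--             group = []
--         group.append(line)
--     return groups
-- ===== SOURCE B (Python) =====
-- def _group_lines_by_page(lines):
--     starts = [0]
--     for i, line in enumerate(lines):
--         if line[0] == '1' and i > 0:
--             starts.append(i)
--     return [lines[a:b] for a, b in zip(starts, starts[1:])]
-- ===== Notes on version B (the rewrite author's own statement) =====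
-- stated objective: alternative
-- what changed: Replaces A's one-pass accumulator (flush current group whenever a '1'-line follows a nonempty group) by a two-phase index computation: collect the page-start positions, then emit each page as a slice between consecutive start positions (the segment after the last start is never paired, matching A's returned value).
-- outside the precondition, e.g. on _group_lines_by_page(['1a', '']): A raises IndexError, B raises IndexError
import Mathlib
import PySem

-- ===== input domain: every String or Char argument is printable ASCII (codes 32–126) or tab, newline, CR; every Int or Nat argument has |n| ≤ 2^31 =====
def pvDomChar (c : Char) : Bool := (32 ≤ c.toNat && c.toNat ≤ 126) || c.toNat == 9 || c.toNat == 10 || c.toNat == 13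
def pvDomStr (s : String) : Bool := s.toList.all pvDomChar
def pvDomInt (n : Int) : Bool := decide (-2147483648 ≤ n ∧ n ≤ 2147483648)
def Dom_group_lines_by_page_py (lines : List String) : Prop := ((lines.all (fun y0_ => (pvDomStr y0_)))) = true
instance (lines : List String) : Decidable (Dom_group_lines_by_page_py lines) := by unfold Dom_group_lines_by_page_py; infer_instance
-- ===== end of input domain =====

-- B replaces A's single stateful accumulator pass by two phases — collect page-start indices, then emit each page as a slice between consecutive starts (equal return value; no side effects in either).


-- ===== PORT A =====
def group_lines_by_page_py (lines : List String) : List (List String) :=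
  (lines.foldl
    (fun (s : List (List String) × List String) line =>
      if PySem.Str.pyGet? line 0 = some '1' ∧ 0 < s.2.length then
        (s.1 ++ [s.2], [line])
      else
        (s.1, s.2 ++ [line]))
    ([], [])).1

-- ===== PORT B =====
def group_lines_by_page_py_alt (lines : List String) : List (List String) :=
  let starts : List Int :=
    (PySem.List.enumerate lines).foldl
      (fun st p => if PySem.Str.pyGet? p.2 0 = some '1' ∧ 0 < p.1 then st ++ [p.1] else st)
      [0]
  (starts.zip (PySem.List.slice starts (some 1) none)).map
    (fun ab => PySem.List.slice lines (some ab.1) (some ab.2))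

-- ===== PRECONDITION & SPEC =====
-- Pre_ excludes inputs containing an empty line: there A (and B alike) evaluates line[0] and raises IndexError.
def Pre_group_lines_by_page_py (lines : List String) : Prop := ∀ l ∈ lines, l ≠ ""
instance (lines : List String) : Decidable (Pre_group_lines_by_page_py lines) := by unfold Pre_group_lines_by_page_py; infer_instance
def pvWitness_group_lines_by_page_py : List String := ["1 PAGE 1", "data", "1 PAGE 2", "more"]

def Spec_group_lines_by_page_py (lines : List String) (out : List (List String)) : Prop := out = group_lines_by_page_py_alt lines
instance (lines : List String) (out : List (List String)) : Decidable (Spec_group_lines_by_page_py lines out) := by unfold Spec_group_lines_by_page_py; infer_instance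

-- ===== CLAIM (what is proved, stated in full; the proofs are below) =====
def Claim_equal_group_lines_by_page_py : Prop := ∀ (lines : List String), Dom_group_lines_by_page_py lines → Pre_group_lines_by_page_py lines → Spec_group_lines_by_page_py lines (group_lines_by_page_py lines)

-- ===== LEMMAS AND PROOFS =====

-- full split of the input into pages (including the trailing page A drops)
def pvChunk : List String → List String → List (List String)
  | acc, [] => [acc]
  | acc, l :: rest =>
    if PySem.Str.pyGet? l 0 = some '1' then acc :: pvChunk [l] rest
    else pvChunk (acc ++ [l]) rest

-- page-start indices of the suffix that begins at position j
def pvStartsN : Nat → List String → List Nat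
  | _, [] => []
  | j, l :: rest =>
    if PySem.Str.pyGet? l 0 = some '1' ∧ 0 < j then j :: pvStartsN (j + 1) rest
    else pvStartsN (j + 1) rest

def pvSliceN (lines : List String) (s t : Nat) : List String := (lines.drop s).take (t - s)

-- segments of `lines` between consecutive cut points, last segment running to the end
def pvSegs (lines : List String) : Nat → List Nat → List (List String)
  | s, [] => [pvSliceN lines s lines.length]
  | s, t :: r => pvSliceN lines s t :: pvSegs lines t r

theorem pvChunk_ne_nil (ls acc : List String) : pvChunk acc ls ≠ [] := by
  cases ls with
  | nil => simp [pvChunk]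
  | cons l rest =>
    rw [pvChunk]
    split
    · simp
    · exact pvChunk_ne_nil rest (acc ++ [l])

theorem pvSegs_ne_nil (lines : List String) (cuts : List Nat) (s : Nat) :
    pvSegs lines s cuts ≠ [] := by
  cases cuts <;> simp [pvSegs]

theorem pvA_fold (ls : List String) (gs : List (List String)) (acc : List String)
    (hacc : acc ≠ []) :
    (ls.foldl
      (fun (s : List (List String) × List String) line =>
        if PySem.Str.pyGet? line 0 = some '1' ∧ 0 < s.2.length then
          (s.1 ++ [s.2], [line])
        else
          (s.1, s.2 ++ [line]))
      (gs, acc)).1 = gs ++ (pvChunk acc ls).dropLast := by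
  induction ls generalizing gs acc with
  | nil => simp [pvChunk]
  | cons l rest ih =>
    have hlen : 0 < acc.length := List.length_pos_iff.mpr hacc
    rw [List.foldl_cons]
    by_cases h : PySem.Str.pyGet? l 0 = some '1'
    · rw [if_pos ⟨h, hlen⟩, ih _ _ (by simp), pvChunk, if_pos h,
        List.dropLast_cons_of_ne_nil (pvChunk_ne_nil rest [l])]
      simp
    · rw [if_neg (by exact fun hx => h hx.1), ih _ _ (by simp), pvChunk, if_neg h]

theorem pvB_fold (ls : List String) (j : Nat) (st : List Int) :
    (PySem.List.enumerate ls (j : Int)).foldl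
      (fun st p => if PySem.Str.pyGet? p.2 0 = some '1' ∧ 0 < p.1 then st ++ [p.1] else st)
      st = st ++ (pvStartsN j ls).map (fun k : Nat => (k : Int)) := by
  induction ls generalizing j st with
  | nil => simp [PySem.List.enumerate_nil, pvStartsN]
  | cons l rest ih =>
    rw [PySem.List.enumerate_cons, List.foldl_cons,
      show ((j : Int) + 1) = ((j + 1 : Nat) : Int) by push_cast; ring]
    by_cases h : PySem.Str.pyGet? l 0 = some '1' ∧ 0 < j
    · rw [if_pos (show PySem.Str.pyGet? (((j : Int), l)).2 0 = some '1' ∧ 0 < (((j : Int), l)).1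
          from ⟨h.1, by show (0 : Int) < (j : Int); exact_mod_cast h.2⟩), ih, pvStartsN, if_pos h]
      simp
    · have hneg : ¬ (PySem.Str.pyGet? (((j : Int), l)).2 0 = some '1' ∧ 0 < (((j : Int), l)).1) := by
        intro hx
        have hx2 : (0 : Int) < (j : Int) := hx.2
        exact h ⟨hx.1, by exact_mod_cast hx2⟩
      rw [if_neg hneg, ih, pvStartsN, if_neg h]

theorem pvCore (lines : List String) (ls : List String) :
    ∀ (j s : Nat), s < j → ls = lines.drop j →
    pvChunk (pvSliceN lines s j) ls = pvSegs lines s (pvStartsN j ls) := by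
  induction ls with
  | nil =>
    intro j s hsj hdrop
    have hj : lines.length ≤ j := by
      by_contra hlt
      exact absurd hdrop.symm (by simp [List.drop_eq_nil_iff]; omega)
    have h1 : pvSliceN lines s j = lines.drop s :=
      List.take_of_length_le (by simp; omega)
    have h2 : pvSliceN lines s lines.length = lines.drop s :=
      List.take_of_length_le (by simp)
    simp [pvChunk, pvStartsN, pvSegs, h1, h2]
  | cons l rest ih =>
    intro j s hsj hdrop
    have hjlt : j < lines.length := by
      by_contra hge
      have : lines.drop j = [] := List.drop_eq_nil_iff.mpr (Nat.le_of_not_lt hge)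
      rw [this] at hdrop
      exact absurd hdrop (by simp)
    have hrest : rest = lines.drop (j + 1) := by
      have hd : lines.drop (j + 1) = (lines.drop j).tail := by
        rw [← List.drop_drop]
        simp
      rw [hd, ← hdrop]
      rfl
    have hsingle : pvSliceN lines j (j + 1) = [l] := by
      unfold pvSliceN
      rw [← hdrop]
      simp
    by_cases h : PySem.Str.pyGet? l 0 = some '1'
    · rw [pvChunk, if_pos h, ← hsingle, ih (j + 1) j (by omega) hrest,
        pvStartsN, if_pos ⟨h, by omega⟩, pvSegs]
    · have hget : (lines.drop s)[j - s]? = some l := by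
        have h1 : (lines.drop s)[j - s]? = lines[s + (j - s)]? := List.getElem?_drop
        have h2 : (lines.drop j)[0]? = lines[j + 0]? := List.getElem?_drop
        rw [← hdrop] at h2
        simp only [List.getElem?_cons_zero, Nat.add_zero] at h2
        rw [h1, show s + (j - s) = j by omega, ← h2]
      have hext : pvSliceN lines s j ++ [l] = pvSliceN lines s (j + 1) := by
        unfold pvSliceN
        rw [show j + 1 - s = (j - s) + 1 by omega, List.take_add_one, hget]
        simp
      rw [pvChunk, if_neg h, hext, ih (j + 1) s (by omega) hrest,
        pvStartsN, if_neg (by exact fun hx => h hx.1)]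

theorem pvDropLast_segs (lines : List String) (cuts : List Nat) :
    ∀ (s : Nat), (pvSegs lines s cuts).dropLast
      = ((s :: cuts).zip cuts).map (fun ab => pvSliceN lines ab.1 ab.2) := by
  induction cuts with
  | nil => intro s; simp [pvSegs]
  | cons t r ih =>
    intro s
    rw [pvSegs, List.dropLast_cons_of_ne_nil (pvSegs_ne_nil lines r t), ih t,
      List.zip_cons_cons, List.map_cons]

theorem pvZipCast (lines : List String) (xs ys : List Nat) :
    ((xs.map (fun k : Nat => (k : Int))).zip (ys.map (fun k : Nat => (k : Int)))).map
        (fun ab => PySem.List.slice lines (some ab.1) (some ab.2))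
      = (xs.zip ys).map (fun ab => pvSliceN lines ab.1 ab.2) := by
  induction xs generalizing ys with
  | nil => simp
  | cons x xs' ih =>
    cases ys with
    | nil => simp
    | cons y ys' =>
      simp only [List.map_cons, List.zip_cons_cons]
      rw [ih ys']
      simp [PySem.List.slice_natCast, pvSliceN]

theorem pvB_closed (lines : List String) :
    group_lines_by_page_py_alt lines
      = ((0 :: pvStartsN 0 lines).zip (pvStartsN 0 lines)).map
          (fun ab => pvSliceN lines ab.1 ab.2) := by
  have hfold : (PySem.List.enumerate lines).foldl
      (fun st p => if PySem.Str.pyGet? p.2 0 = some '1' ∧ 0 < p.1 then st ++ [p.1] else st)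
      [0] = ((0 :: pvStartsN 0 lines).map (fun k : Nat => (k : Int))) := by
    rw [show (PySem.List.enumerate lines : List (Int × String))
          = PySem.List.enumerate lines ((0 : Nat) : Int) from rfl,
      pvB_fold]
    simp only [List.map_cons, List.singleton_append, Nat.cast_zero]
  unfold group_lines_by_page_py_alt
  simp only [hfold, PySem.List.slice_from_one]
  rw [show ((0 :: pvStartsN 0 lines).map (fun k : Nat => (k : Int))).tail
        = (pvStartsN 0 lines).map (fun k : Nat => (k : Int)) by simp]
  exact pvZipCast lines (0 :: pvStartsN 0 lines) (pvStartsN 0 lines)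

theorem group_lines_by_page_py_eq_alt (lines : List String) :
    group_lines_by_page_py lines = group_lines_by_page_py_alt lines := by
  rw [pvB_closed]
  cases lines with
  | nil => simp [group_lines_by_page_py, pvStartsN]
  | cons l rest =>
    unfold group_lines_by_page_py
    rw [List.foldl_cons, if_neg (by simp), List.nil_append]
    rw [pvA_fold rest [] [l] (by simp), List.nil_append]
    rw [show ([l] : List String) = pvSliceN (l :: rest) 0 1 by simp [pvSliceN],
      pvCore (l :: rest) rest 1 0 (by omega) rfl, pvDropLast_segs,
      show pvStartsN 1 rest = pvStartsN 0 (l :: rest) by simp [pvStartsN]]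

-- ===== VERDICT (by name: the statement is the Claim_ definition above) =====
theorem group_lines_by_page_py_spec : Claim_equal_group_lines_by_page_py := by
  intro lines _ _
  unfold Spec_group_lines_by_page_py
  exact group_lines_by_page_py_eq_alt lines
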